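-- pv_equiv track=rewrite | github.com/sidharthshah/python-training | session-16/GoodCompanyDivTwo.py | countGood
-- ===== SOURCE A (Python) =====
-- def countGood(superior, workType):
-- 	result = 0
-- 	for i in range(len(superior)):
-- 		department = []
-- 		department.append(i)
--
-- 		for j in range(i+1, len(superior)):
-- 			if superior[j] == i:
-- 				department.append(j)
--
-- 		department_work = {}
-- 		for member in department:
-- 			department_work[workType[member]] = 0
--
-- 		if len(department_work) == len(department):
-- 			result += 1
-- 	return result
-- ===== SOURCE B (Python) =====
-- def countGood(superior, workType):
--     n = len(superior)
--     # one pass: bucket each employee j under its superior s (only valid manager links have 0 <= s < j)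
--     buckets = {}
--     for j in range(n):
--         s = superior[j]
--         if 0 <= s < j:
--             buckets.setdefault(s, []).append(j)
--     result = 0
--     for i in range(n):
--         seen = {workType[i]}
--         ok = True
--         for j in buckets.get(i, []):
--             t = workType[j]
--             if t in seen:
--                 ok = False
--                 break
--             seen.add(t)
--         if ok:
--             result += 1
--     return result
-- ===== Notes on version B (the rewrite author's own statement) =====
-- stated objective: faster
-- what changed: Replaces the O(n^2) per-manager rescan of all later employees by a single pass that buckets each employee under its superior, then a per-manager set walk with early exit to check work-type distinctness.
import Mathlib
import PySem

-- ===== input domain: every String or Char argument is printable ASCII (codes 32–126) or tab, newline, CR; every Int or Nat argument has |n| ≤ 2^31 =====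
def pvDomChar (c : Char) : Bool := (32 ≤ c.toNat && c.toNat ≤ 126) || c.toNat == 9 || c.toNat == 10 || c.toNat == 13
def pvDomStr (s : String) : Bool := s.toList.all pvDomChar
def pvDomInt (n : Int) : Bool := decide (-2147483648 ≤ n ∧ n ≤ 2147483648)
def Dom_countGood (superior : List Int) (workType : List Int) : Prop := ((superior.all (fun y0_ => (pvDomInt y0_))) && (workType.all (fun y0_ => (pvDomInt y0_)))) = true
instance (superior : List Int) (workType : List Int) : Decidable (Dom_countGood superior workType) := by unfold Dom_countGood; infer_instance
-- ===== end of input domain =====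

-- B buckets employees by superior in ONE pass and checks distinctness with a set (early exit);
-- A rescans all later employees for every manager. Equivalence is about the return value.

-- ===== PORT A =====
def countGood (superior : List Int) (workType : List Int) : Int :=
  (PySem.List.pyRange 0 superior.length 1).foldl (fun result i =>
    let department :=
      (PySem.List.pyRange (i + 1) superior.length 1).foldl
        (fun dep j => if PySem.List.pyGetD superior j 0 = i then dep ++ [j] else dep) [i]
    let departmentWork :=
      department.foldl
        (fun (d : PySem.Dict Int Int) m => d.insert (PySem.List.pyGetD workType m 0) 0)
        PySem.Dict.empty
    if departmentWork.size = department.length then result + 1 else result) 0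

-- ===== PORT B =====
-- one pass: bucket each employee j under its superior s (only valid manager links have 0 <= s < j)
def bucketsB (superior : List Int) : PySem.Dict Int (List Int) :=
  (PySem.List.pyRange 0 superior.length 1).foldl
    (fun d j =>
      let s := PySem.List.pyGetD superior j 0
      if 0 ≤ s ∧ s < j then d.modify s [] (· ++ [j]) else d)
    PySem.Dict.empty

-- inner 'for j in buckets.get(i, [])' loop with its break
def checkLoopB (workType : List Int) (seen : PySem.Set Int) : List Int → Bool
  | [] => true
  | j :: rest =>
    let t := PySem.List.pyGetD workType j 0
    if PySem.Set.contains seen t then false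
    else checkLoopB workType (PySem.Set.add seen t) rest

def countGood_alt (superior : List Int) (workType : List Int) : Int :=
  let buckets := bucketsB superior
  (PySem.List.pyRange 0 superior.length 1).foldl (fun result i =>
    let seen : PySem.Set Int := PySem.Set.ofList [PySem.List.pyGetD workType i 0]
    if checkLoopB workType seen (buckets.getD i []) then result + 1 else result) 0

-- ===== PRECONDITION & SPEC =====
-- A (and B) index workType at every position of superior: both raise IndexError when workType is shorter.
def Pre_countGood (superior : List Int) (workType : List Int) : Prop :=
  superior.length ≤ workType.length
instance (superior : List Int) (workType : List Int) : Decidable (Pre_countGood superior workType) := by unfold Pre_countGood; infer_instance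
def pvWitness_countGood : List Int × List Int := ([0, 0, 1], [4, 5, 4])

def Spec_countGood (superior : List Int) (workType : List Int) (out : Int) : Prop := out = countGood_alt superior workType
instance (superior : List Int) (workType : List Int) (out : Int) : Decidable (Spec_countGood superior workType out) := by unfold Spec_countGood; infer_instance

-- ===== CLAIM (what is proved, stated in full; the proofs are below) =====
def Claim_equal_countGood : Prop := ∀ (superior : List Int) (workType : List Int), Dom_countGood superior workType → Pre_countGood superior workType → Spec_countGood superior workType (countGood superior workType)

-- ===== LEMMAS AND PROOFS =====

-- the subordinates j > i of manager i, as A's inner scan produces them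
def deptTail (superior : List Int) (i : Int) : List Int :=
  (PySem.List.pyRange (i + 1) superior.length 1).filter
    (fun j => decide (PySem.List.pyGetD superior j 0 = i))

theorem deptA_eq (superior : List Int) (i : Int) :
    (PySem.List.pyRange (i + 1) superior.length 1).foldl
      (fun dep j => if PySem.List.pyGetD superior j 0 = i then dep ++ [j] else dep) [i]
    = i :: deptTail superior i := by
  rw [PySem.List.foldl_append_ite_eq_filter (fun j => PySem.List.pyGetD superior j 0 = i)]
  rfl

-- getD of a grouping loop 'd[s(j)] = d.get(s(j), []) + [j]'
theorem getD_fold_modify (s : Int → Int) (l : List Int) (c : Int) :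
    ∀ (d : PySem.Dict Int (List Int)),
      (l.foldl (fun d j => d.modify (s j) [] (· ++ [j])) d).getD c []
      = d.getD c [] ++ l.filter (fun j => s j == c) := by
  induction l with
  | nil => intro d; simp
  | cons j l ih =>
    intro d
    rw [List.foldl_cons, ih, PySem.Dict.getD_modify]
    by_cases h : s j = c
    · rw [if_pos h.symm, h]
      simp [h]
    · rw [if_neg (fun hc => h hc.symm)]
      simp [h]

theorem bucket_eq (superior : List Int) (i : Int) (h0 : 0 ≤ i)
    (hn : i < (superior.length : Int)) :
    (bucketsB superior).getD i [] = deptTail superior i := by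
  have h1 : bucketsB superior =
      ((PySem.List.pyRange 0 superior.length 1).filter
          (fun j => decide (0 ≤ PySem.List.pyGetD superior j 0 ∧ PySem.List.pyGetD superior j 0 < j))).foldl
        (fun d j => d.modify (PySem.List.pyGetD superior j 0) [] (· ++ [j])) PySem.Dict.empty := by
    unfold bucketsB
    rw [List.foldl_filter]
    apply PySem.List.foldl_congr_mem'
    intro x _ acc
    by_cases h : 0 ≤ PySem.List.pyGetD superior x 0 ∧ PySem.List.pyGetD superior x 0 < x <;> simp [h]
  rw [h1, getD_fold_modify, PySem.Dict.getD_empty, List.nil_append, List.filter_filter]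
  have hsplit : PySem.List.pyRange 0 (superior.length : Int) 1
      = PySem.List.pyRange 0 (i + 1) 1 ++ PySem.List.pyRange (i + 1) (superior.length : Int) 1 :=
    PySem.List.pyRange_one_append 0 (i + 1) _ (by omega) (by omega)
  rw [hsplit, List.filter_append]
  have hnil : (PySem.List.pyRange 0 (i + 1) 1).filter
      (fun j => (PySem.List.pyGetD superior j 0 == i) &&
        decide (0 ≤ PySem.List.pyGetD superior j 0 ∧ PySem.List.pyGetD superior j 0 < j)) = [] := by
    apply List.filter_eq_nil_iff.mpr
    intro j hj
    have hj' := PySem.List.mem_pyRange_one.mp hj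
    simp only [beq_iff_eq, Bool.and_eq_true, decide_eq_true_eq, not_and]
    intro hEq hconj
    omega
  rw [hnil, List.nil_append]
  unfold deptTail
  apply List.filter_congr
  intro j hj
  have hj' := PySem.List.mem_pyRange_one.mp hj
  rw [Bool.eq_iff_iff]
  simp only [beq_iff_eq, Bool.and_eq_true, decide_eq_true_eq]
  constructor
  · rintro ⟨hEq, -⟩; exact hEq
  · intro hEq; exact ⟨hEq, by omega, by omega⟩

theorem sizeFold (key : Int → Int) (ts : List Int) :
    ∀ (d : PySem.Dict Int Int), d.keys.Nodup →
    (ts.foldl (fun d t => d.insert (key t) 0) d).size ≤ d.size + ts.length ∧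
    ((ts.foldl (fun d t => d.insert (key t) 0) d).size = d.size + ts.length ↔
      (ts.map key).Nodup ∧ ∀ t ∈ ts, key t ∉ d.keys) := by
  induction ts with
  | nil => intro d _; simp
  | cons t ts ih =>
    intro d hd
    have hd' : (d.insert (key t) 0).keys.Nodup := PySem.Dict.nodup_keys_insert d (key t) 0 hd
    obtain ⟨ihle, ihiff⟩ := ih (d.insert (key t) 0) hd'
    by_cases hc : d.contains (key t) = true
    · have hsz : (d.insert (key t) 0).size = d.size := by rw [PySem.Dict.size_insert, if_pos hc]
      have hmem : key t ∈ d.keys := (PySem.Dict.contains_iff_mem_keys d (key t)).mp hc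
      rw [List.foldl_cons]
      refine ⟨by simp only [List.length_cons]; omega, ?_, ?_⟩
      · intro hEq; exfalso; rw [hsz] at ihle; simp only [List.length_cons] at hEq; omega
      · rintro ⟨-, hall⟩; exact absurd hmem (hall t (List.mem_cons_self))
    · have hc' : d.contains (key t) = false := by simpa using hc
      have hsz : (d.insert (key t) 0).size = d.size + 1 := by
        rw [PySem.Dict.size_insert, if_neg (by simp [hc'])]
      have hkeys : (d.insert (key t) 0).keys = d.keys ++ [key t] :=
        PySem.Dict.keys_insert_of_not_contains d 0 hc'
      have htnot : key t ∉ d.keys := by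
        intro hmem; rw [(PySem.Dict.contains_iff_mem_keys d (key t)).mpr hmem] at hc'; cases hc'
    -- keys of the intermediate dict, as a membership fact
      have hkmem : ∀ u : Int, u ∈ (d.insert (key t) 0).keys ↔ u ∈ d.keys ∨ u = key t := by
        intro u; rw [hkeys]; simp
      rw [List.foldl_cons]
      rw [hsz] at ihle ihiff
      refine ⟨by simp only [List.length_cons]; omega, ?_, ?_⟩
      · intro hEq
        obtain ⟨hnd, hall⟩ := ihiff.mp (by simp only [List.length_cons] at hEq; omega)
        have htts : key t ∉ ts.map key := by
          rintro hmem
          obtain ⟨u, hu, hEq'⟩ := List.mem_map.mp hmem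
          exact hall u hu ((hkmem (key u)).mpr (Or.inr hEq'))
        refine ⟨List.nodup_cons.mpr ⟨htts, hnd⟩, ?_⟩
        intro u hu
        rcases List.mem_cons.mp hu with rfl | hu'
        · exact htnot
        · intro humem
          exact hall u hu' ((hkmem (key u)).mpr (Or.inl humem))
      · rintro ⟨hnd, hall⟩
        rw [List.map_cons, List.nodup_cons] at hnd
        obtain ⟨htts, hnd'⟩ := hnd
        have : (ts.foldl (fun d t => d.insert (key t) 0) (d.insert (key t) 0)).size
            = d.size + 1 + ts.length := by
          apply ihiff.mpr
          refine ⟨hnd', ?_⟩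
          intro u hu humem
          rcases (hkmem (key u)).mp humem with hin | hEq'
          · exact hall u (List.mem_cons_of_mem t hu) hin
          · exact htts (hEq' ▸ List.mem_map_of_mem hu)
        simp only [List.length_cons]; omega

theorem checkLoop_iff (workType : List Int) (bl : List Int) :
    ∀ (S : PySem.Set Int), checkLoopB workType S bl = true ↔
      ((bl.map (fun j => PySem.List.pyGetD workType j 0)).Nodup ∧
        ∀ j ∈ bl, PySem.List.pyGetD workType j 0 ∉ S) := by
  induction bl with
  | nil => intro S; simp [checkLoopB]
  | cons j rest ih =>
    intro S
    by_cases hc : PySem.Set.contains S (PySem.List.pyGetD workType j 0) = true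
    · have hmem : PySem.List.pyGetD workType j 0 ∈ S := (PySem.Set.contains_iff S _).mp hc
      simp only [checkLoopB, hc, if_true]
      constructor
      · intro h; cases h
      · rintro ⟨-, hall⟩; exact absurd hmem (hall j (List.mem_cons_self))
    · have hnmem : PySem.List.pyGetD workType j 0 ∉ S := fun hm =>
        hc ((PySem.Set.contains_iff S _).mpr hm)
      simp only [checkLoopB, hc, if_false, Bool.false_eq_true]
      rw [ih]
      simp only [List.map_cons, List.nodup_cons, List.mem_cons, List.mem_map]
      constructor
      · rintro ⟨hnd, hall⟩
        refine ⟨⟨?_, hnd⟩, ?_⟩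
        · rintro ⟨u, hu, hEq⟩
          exact hall u hu ((PySem.Set.mem_add S _ _).mpr (Or.inr hEq))
        · intro u hu
          rcases hu with rfl | hu'
          · exact hnmem
          · intro humem
            exact hall u hu' ((PySem.Set.mem_add S _ _).mpr (Or.inl humem))
      · rintro ⟨⟨hne, hnd⟩, hall⟩
        refine ⟨hnd, ?_⟩
        intro u hu humem
        rcases (PySem.Set.mem_add S _ _).mp humem with hin | hEq
        · exact hall u (Or.inr hu) hin
        · exact hne ⟨u, hu, hEq⟩

-- ===== VERDICT (by name: the statement is the Claim_ definition above) =====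
theorem countGood_spec : Claim_equal_countGood := by
  intro superior workType _ _
  unfold Spec_countGood countGood countGood_alt
  apply PySem.List.foldl_congr_mem'
  intro i hi acc
  have hi' := PySem.List.mem_pyRange_one.mp hi
  rw [deptA_eq, bucket_eq superior i hi'.1 hi'.2]
  dsimp only
  have hiffA := ((sizeFold (fun m => PySem.List.pyGetD workType m 0)
      (i :: deptTail superior i) PySem.Dict.empty PySem.Dict.nodup_keys_empty).2)
  rw [PySem.Dict.size_empty, PySem.Dict.keys_empty] at hiffA
  simp only [Nat.zero_add, List.not_mem_nil, not_false_iff, imp_true_iff, and_true] at hiffA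
  have hiffB := checkLoop_iff workType (deptTail superior i)
      (PySem.Set.ofList [PySem.List.pyGetD workType i 0])
  have hS : (PySem.Set.ofList [PySem.List.pyGetD workType i 0] : PySem.Set Int)
      = [PySem.List.pyGetD workType i 0] := rfl
  rw [hS] at hiffB
  simp only [List.mem_singleton] at hiffB
  have hiffB' : checkLoopB workType [PySem.List.pyGetD workType i 0] (deptTail superior i) = true
      ↔ ((i :: deptTail superior i).map (fun j => PySem.List.pyGetD workType j 0)).Nodup := by
    rw [hiffB]
    simp only [List.map_cons, List.nodup_cons, List.mem_map]
    constructor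
    · rintro ⟨hnd, hall⟩
      refine ⟨?_, hnd⟩
      rintro ⟨u, hu, hEq⟩
      exact hall u hu hEq
    · rintro ⟨hne, hnd⟩
      refine ⟨hnd, ?_⟩
      intro u hu hEq
      exact hne ⟨u, hu, hEq⟩
  by_cases h : ((i :: deptTail superior i).map (fun j => PySem.List.pyGetD workType j 0)).Nodup
  · rw [if_pos (hiffA.mpr h), if_pos (by rw [hS]; exact hiffB'.mpr h)]
  · rw [if_neg (fun hc => h (hiffA.mp hc)),
       if_neg (fun hc => h (hiffB'.mp (by rw [← hS]; exact hc)))]
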